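-- pv_equiv track=rewrite | github.com/Wilreyyt/FirstTry | homework_9/candles.py | count_candles
-- ===== SOURCE A (Python) =====
-- def count_candles(
--         candle_count: int,
--         remainder_count: int,
--         remainders_for_new: int
-- ) -> int:
--     """Подсчет свечей"""
--     if candle_count == 0:
--         return 0
--
--     remainders_derived = candle_count + remainder_count
--
--     new_candle_count = remainders_derived // remainders_for_new
--     remainders_left = remainders_derived % remainders_for_new
--
--     count_from_remaining = count_candles(
--         new_candle_count,
--         remainders_left,
--         remainders_for_new
--     )
--
--     return candle_count + count_from_remaining
-- ===== SOURCE B (Python) =====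
-- def count_candles(
--         candle_count: int,
--         remainder_count: int,
--         remainders_for_new: int
-- ) -> int:
--     """Подсчет свечей: enumerate the burn rounds, then sum them."""
--     def rounds(c, r):
--         while c != 0:
--             yield c
--             c, r = divmod(c + r, remainders_for_new)
--     return sum(rounds(candle_count, remainder_count))
-- ===== Notes on version B (the rewrite author's own statement) =====
-- stated objective: alternative
-- what changed: Instead of a recursion that adds as it unwinds, B separates concerns: a generator unfolds the sequence of per-round burn counts (state advanced with divmod), and the answer is sum() of that sequence.
import Mathlib
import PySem

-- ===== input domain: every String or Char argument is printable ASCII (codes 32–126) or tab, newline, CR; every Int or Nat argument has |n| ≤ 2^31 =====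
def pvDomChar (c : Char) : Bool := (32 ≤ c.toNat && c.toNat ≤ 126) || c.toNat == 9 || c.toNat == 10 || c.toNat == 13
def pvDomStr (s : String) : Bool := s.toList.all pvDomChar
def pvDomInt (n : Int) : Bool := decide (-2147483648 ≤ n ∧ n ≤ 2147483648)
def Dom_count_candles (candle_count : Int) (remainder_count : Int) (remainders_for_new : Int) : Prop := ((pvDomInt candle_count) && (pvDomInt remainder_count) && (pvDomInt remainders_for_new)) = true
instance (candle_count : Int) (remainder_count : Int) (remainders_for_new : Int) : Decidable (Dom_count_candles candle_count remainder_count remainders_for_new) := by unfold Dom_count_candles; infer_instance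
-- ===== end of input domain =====

-- B unfolds the sequence of per-round burn counts into a list and sums it, instead of A's recursion
-- that adds while unwinding; objective: alternative decomposition. Both ports carry a fuel parameter
-- only to be total in Lean; fuel 100 exceeds the number of recycling rounds on every input admitted
-- by Dom_ ∧ Pre_.

-- ===== PORT A =====
def count_candles_rec (fuel : Nat) (candle_count : Int) (remainder_count : Int) (remainders_for_new : Int) : Int :=
  match fuel with
  | 0 => 0
  | fuel + 1 =>
    if candle_count = 0 then 0
    else
      let remainders_derived := candle_count + remainder_count
      let new_candle_count := PySem.Int.floordiv remainders_derived remainders_for_new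
      let remainders_left := PySem.Int.mod remainders_derived remainders_for_new
      let count_from_remaining := count_candles_rec fuel new_candle_count remainders_left remainders_for_new
      candle_count + count_from_remaining

def count_candles (candle_count : Int) (remainder_count : Int) (remainders_for_new : Int) : Int :=
  count_candles_rec 100 candle_count remainder_count remainders_for_new

-- ===== PORT B =====
-- the generator 'rounds': the list of burn counts yielded round by round
def burn_rounds (fuel : Nat) (c : Int) (r : Int) (remainders_for_new : Int) : List Int :=
  match fuel with
  | 0 => []
  | fuel + 1 =>
    if c ≠ 0 then
      c :: burn_rounds fuel (PySem.Int.floordiv (c + r) remainders_for_new)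
        (PySem.Int.mod (c + r) remainders_for_new) remainders_for_new
    else []

def count_candles_alt (candle_count : Int) (remainder_count : Int) (remainders_for_new : Int) : Int :=
  (burn_rounds 100 candle_count remainder_count remainders_for_new).sum

-- ===== PRECONDITION & SPEC =====
-- Pre_ is exactly the set of inputs on which the Python A returns: it excludes only inputs where A
-- raises (ZeroDivisionError for remainders_for_new = 0 with candle_count ≠ 0, RecursionError where
-- the recurrence never reaches candle_count = 0: |divisor| = 1 with candle_count + remainder_count ≠ 0,
-- and divisor ≤ -2 with candle_count + remainder_count ≡ 1 (mod 1 - divisor), the one residue class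
-- mod (1 - divisor) that the recurrence preserves and that never meets the terminating window).
def Pre_count_candles (candle_count : Int) (remainder_count : Int) (remainders_for_new : Int) : Prop :=
  candle_count = 0 ∨ 2 ≤ remainders_for_new ∨
  (remainders_for_new ≤ -2 ∧ PySem.Int.mod (candle_count + remainder_count) (1 - remainders_for_new) ≠ 1) ∨
  ((remainders_for_new = 1 ∨ remainders_for_new = -1) ∧ candle_count + remainder_count = 0)
instance (candle_count : Int) (remainder_count : Int) (remainders_for_new : Int) : Decidable (Pre_count_candles candle_count remainder_count remainders_for_new) := by unfold Pre_count_candles; infer_instance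

def pvWitness_count_candles : Int × Int × Int := (5, 2, 2)

def Spec_count_candles (candle_count : Int) (remainder_count : Int) (remainders_for_new : Int) (out : Int) : Prop := out = count_candles_alt candle_count remainder_count remainders_for_new
instance (candle_count : Int) (remainder_count : Int) (remainders_for_new : Int) (out : Int) : Decidable (Spec_count_candles candle_count remainder_count remainders_for_new out) := by unfold Spec_count_candles; infer_instance

-- ===== CLAIM (what is proved, stated in full; the proofs are below) =====
def Claim_equal_count_candles : Prop := ∀ (candle_count : Int) (remainder_count : Int) (remainders_for_new : Int), Dom_count_candles candle_count remainder_count remainders_for_new → Pre_count_candles candle_count remainder_count remainders_for_new → Spec_count_candles candle_count remainder_count remainders_for_new (count_candles candle_count remainder_count remainders_for_new)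

-- ===== LEMMAS AND PROOFS =====
-- For every fuel, the sum of B's round list equals A's recursion (both truncate to the same partial
-- sum when fuel runs out, so the identity holds unconditionally).
theorem sum_burn_rounds_eq_rec (fuel : Nat) : ∀ (c r d : Int),
    (burn_rounds fuel c r d).sum = count_candles_rec fuel c r d := by
  induction fuel with
  | zero => intro c r d; simp [burn_rounds, count_candles_rec]
  | succ n ih =>
    intro c r d
    by_cases h : c = 0
    · simp [burn_rounds, count_candles_rec, h]
    · simp only [burn_rounds, count_candles_rec, h, ne_eq, not_false_eq_true, if_true,
        if_neg, List.sum_cons]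
      rw [ih]

-- ===== VERDICT (by name: the statement is the Claim_ definition above) =====
theorem count_candles_spec : Claim_equal_count_candles := by
  intro c r d _ _
  unfold Spec_count_candles count_candles count_candles_alt
  rw [sum_burn_rounds_eq_rec]
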